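-- pv_equiv track=rewrite | github.com/Paribartan-Timalsina/COMP314LAB1TESTCASES | Labs/algorithm lab 2/main.py | mergesortWorstCase
-- ===== SOURCE A (Python) =====
-- def mergesortWorstCase(arr,sort=True):
--     n = len(arr)
--     if n <= 1:
--         return arr
--
--     if n == 2:
--         arr[0], arr[1] = arr[1], arr[0]
--         return arr
--     if sort:
--         arr = sorted(arr)
--     else:
--         arr = arr.copy()
--     left_arr = arr[::2]
--     right_arr = arr[1::2]
--     return mergesortWorstCase(left_arr,sort=False) + mergesortWorstCase(right_arr,sort=False)
-- ===== SOURCE B (Python) =====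
-- def mergesortWorstCase(arr, sort=True):
--     n = len(arr)
--     if n <= 1:
--         return arr
--     if n == 2:
--         arr[0], arr[1] = arr[1], arr[0]
--         return arr
--     if sort:
--         work = sorted(arr)
--     else:
--         work = arr.copy()
--     out = []
--     stack = [work]
--     while stack:
--         sub = stack.pop()
--         m = len(sub)
--         if m <= 1:
--             out.extend(sub)
--         elif m == 2:
--             out.extend([sub[1], sub[0]])
--         else:
--             stack.append(sub[1::2])
--             stack.append(sub[::2])
--     return out
-- ===== Notes on version B (the rewrite author's own statement) =====
-- stated objective: alternative
-- what changed: Replaces A's recursive concatenation of left/right half results by a single iterative DFS loop over an explicit stack of sublists with an output accumulator (pushing the odd-index slice below the even-index slice), sorting only once at the top.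
import Mathlib
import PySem

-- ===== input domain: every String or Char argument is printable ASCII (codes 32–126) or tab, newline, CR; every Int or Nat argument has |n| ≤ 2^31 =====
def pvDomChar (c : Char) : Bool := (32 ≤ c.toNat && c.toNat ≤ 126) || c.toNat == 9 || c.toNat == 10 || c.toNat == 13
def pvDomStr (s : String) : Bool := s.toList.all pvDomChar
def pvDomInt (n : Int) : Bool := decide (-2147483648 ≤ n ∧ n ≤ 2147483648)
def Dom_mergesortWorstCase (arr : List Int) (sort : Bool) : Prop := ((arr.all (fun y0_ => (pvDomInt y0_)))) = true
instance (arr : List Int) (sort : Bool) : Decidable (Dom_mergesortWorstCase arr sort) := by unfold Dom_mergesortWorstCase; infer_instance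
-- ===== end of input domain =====

-- B replaces A's recursive left/right concatenation by one explicit-stack DFS loop with an
-- accumulator (objective: alternative decomposition, same cost). Python A and B both mutate
-- `arr` in place only in the top-level n == 2 case, identically; equivalence here is about
-- the returned value.

-- Length bounds for the two step-2 slices; cited by the termination proofs of both ports.
lemma len_even_le {α : Type} (xs : List α) :
    ((PySem.List.slice? xs none none 2).getD []).length ≤ (xs.length + 1) / 2 := by
  simp only [PySem.List.slice?, PySem.List.sliceIndices]
  norm_num
  calc (List.filterMap _ (List.range _)).length ≤ _ := List.length_filterMap_le _ _
    _ ≤ _ := by simp; split <;> omega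

lemma len_odd_le {α : Type} (xs : List α) :
    ((PySem.List.slice? xs (some 1) none 2).getD []).length ≤ xs.length / 2 := by
  simp only [PySem.List.slice?, PySem.List.sliceIndices]
  norm_num
  calc (List.filterMap _ (List.range _)).length ≤ _ := List.length_filterMap_le _ _
    _ ≤ _ := by simp; split <;> omega

-- ===== PORT A =====
-- arr[::2] / arr[1::2] are PySem.List.slice?; the step is the literal 2 ≠ 0, so the slice
-- never raises and `.getD []` is exact.  The n == 2 swap-and-return is the match.
def mergesortWorstCase (arr : List Int) (sort : Bool) : List Int :=
  if arr.length ≤ 1 then arr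
  else if arr.length = 2 then
    (match arr with
     | a :: b :: r => b :: a :: r
     | l => l)
  else
    let arr' := if sort then PySem.List.sorted arr (fun x => x) false else arr
    mergesortWorstCase ((PySem.List.slice? arr' none none 2).getD []) false ++
    mergesortWorstCase ((PySem.List.slice? arr' (some 1) none 2).getD []) false
termination_by arr.length
decreasing_by
  · split
    · have h1 := len_even_le (PySem.List.sorted arr (fun x => x) false)
      have h2 : (PySem.List.sorted arr (fun x => x) false).length = arr.length :=
        PySem.List.length_sorted _ _ _
      omega
    · have h1 := len_even_le arr
      omega
  · split
    · have h1 := len_odd_le (PySem.List.sorted arr (fun x => x) false)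
      have h2 : (PySem.List.sorted arr (fun x => x) false).length = arr.length :=
        PySem.List.length_sorted _ _ _
      omega
    · have h1 := len_odd_le arr
      omega

-- ===== PORT B =====
-- The while-loop over the explicit stack: pop `sub`, emit short sublists (a pair reversed),
-- otherwise push the odd-index slice then the even-index slice.
def altLoop (stack : List (List Int)) (out : List Int) : List Int :=
  match stack with
  | [] => out
  | sub :: st =>
    if sub.length ≤ 1 then altLoop st (out ++ sub)
    else if sub.length = 2 then
      altLoop st (out ++ (match sub with
                          | [] => []
                          | [_] => []
                          | a :: b :: _ => [b, a]))
    else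
      altLoop (((PySem.List.slice? sub none none 2).getD []) ::
               ((PySem.List.slice? sub (some 1) none 2).getD []) :: st) out
termination_by (stack.map (fun l => 2 ^ l.length)).sum
decreasing_by
  · simp only [List.map_cons, List.sum_cons]
    have := Nat.two_pow_pos sub.length
    omega
  · simp only [List.map_cons, List.sum_cons]
    have := Nat.two_pow_pos sub.length
    omega
  · simp only [List.map_cons, List.sum_cons]
    obtain ⟨k, hk⟩ : ∃ k, sub.length = k + 2 := ⟨sub.length - 2, by omega⟩
    have h1 := len_even_le sub
    have h2 := len_odd_le sub
    have p1 : 2 ^ ((PySem.List.slice? sub none none 2).getD []).length ≤ 2 ^ (k + 1) :=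
      Nat.pow_le_pow_right (by omega) (by omega)
    have p2 : 2 ^ ((PySem.List.slice? sub (some 1) none 2).getD []).length ≤ 2 ^ k :=
      Nat.pow_le_pow_right (by omega) (by omega)
    have e2 : 2 ^ sub.length = 2 ^ k * 4 := by rw [hk]; ring
    have := Nat.two_pow_pos k
    omega

def mergesortWorstCase_alt (arr : List Int) (sort : Bool) : List Int :=
  if arr.length ≤ 1 then arr
  else if arr.length = 2 then
    (match arr with
     | [] => arr
     | [_] => arr
     | a :: b :: r => b :: a :: r)
  else
    altLoop [if sort then PySem.List.sorted arr (fun x => x) false else arr] []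

-- ===== PRECONDITION & SPEC =====
def Spec_mergesortWorstCase (arr : List Int) (sort : Bool) (out : List Int) : Prop := out = mergesortWorstCase_alt arr sort
instance (arr : List Int) (sort : Bool) (out : List Int) : Decidable (Spec_mergesortWorstCase arr sort out) := by unfold Spec_mergesortWorstCase; infer_instance

-- ===== CLAIM (what is proved, stated in full; the proofs are below) =====
def Claim_equal_mergesortWorstCase : Prop := ∀ (arr : List Int) (sort : Bool), Dom_mergesortWorstCase arr sort → Spec_mergesortWorstCase arr sort (mergesortWorstCase arr sort)

-- ===== LEMMAS AND PROOFS =====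

-- A with sort = False and length ≥ 3 unfolds to the two recursive calls on the slices.
lemma A_unfold_big (l : List Int) (h : 3 ≤ l.length) :
    mergesortWorstCase l false =
      mergesortWorstCase ((PySem.List.slice? l none none 2).getD []) false ++
      mergesortWorstCase ((PySem.List.slice? l (some 1) none 2).getD []) false := by
  rw [mergesortWorstCase.eq_def]
  simp only [if_neg (by omega : ¬ l.length ≤ 1), if_neg (by omega : ¬ l.length = 2),
    Bool.false_eq_true, if_false]

-- A returns a short list unchanged.
lemma A_small (l : List Int) (h : l.length ≤ 1) (b : Bool) : mergesortWorstCase l b = l := by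
  rw [mergesortWorstCase.eq_def]
  simp only [if_pos h]

-- Processing one stack entry emits exactly A's result for that sublist.
lemma loop_eq : ∀ (n : Nat) (sub : List Int), sub.length ≤ n →
    ∀ (st : List (List Int)) (out : List Int),
    altLoop (sub :: st) out = altLoop st (out ++ mergesortWorstCase sub false) := by
  intro n
  induction n with
  | zero =>
    intro sub h st out
    have hs : sub = [] := List.length_eq_zero_iff.mp (by omega)
    subst hs
    rw [altLoop.eq_def, A_small [] (by simp)]
    simp
  | succ n ih =>
    intro sub h st out
    rcases Nat.lt_or_ge sub.length 3 with hlt | hge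
    · rcases Nat.lt_or_ge sub.length 2 with h1 | h2
      · rw [altLoop.eq_def, A_small sub (by omega)]
        simp only [if_pos (by omega : sub.length ≤ 1)]
      · have h2' : sub.length = 2 := by omega
        match sub, h2' with
        | [a, b], _ =>
          rw [altLoop.eq_def, mergesortWorstCase.eq_def]
          simp
    · have h1 := len_even_le sub
      have h2 := len_odd_le sub
      rw [altLoop.eq_def]
      simp only [if_neg (by omega : ¬ sub.length ≤ 1), if_neg (by omega : ¬ sub.length = 2)]
      rw [ih _ (by omega), ih _ (by omega), List.append_assoc]
      conv_rhs => rw [A_unfold_big sub hge]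

-- ===== VERDICT (by name: the statement is the Claim_ definition above) =====
theorem mergesortWorstCase_spec : Claim_equal_mergesortWorstCase := by
  intro arr sort _hdom
  unfold Spec_mergesortWorstCase
  rw [mergesortWorstCase.eq_def, mergesortWorstCase_alt.eq_def]
  rcases Nat.lt_or_ge arr.length 3 with hlt | hge
  · rcases Nat.lt_or_ge arr.length 2 with h1 | h2
    · simp only [if_pos (by omega : arr.length ≤ 1)]
    · have h2' : arr.length = 2 := by omega
      simp only [if_neg (by omega : ¬ arr.length ≤ 1), if_pos h2']
      match arr, h2' with
      | [a, b], _ => rfl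
  · simp only [if_neg (by omega : ¬ arr.length ≤ 1), if_neg (by omega : ¬ arr.length = 2)]
    have hlen : (if sort then PySem.List.sorted arr (fun x => x) false else arr).length
        = arr.length := by split <;> simp [PySem.List.length_sorted]
    have hw : 3 ≤ (if sort then PySem.List.sorted arr (fun x => x) false else arr).length := by
      omega
    rw [loop_eq _ _ (le_of_eq hlen), altLoop.eq_def]
    simp only [List.nil_append]
    conv_rhs => rw [A_unfold_big _ hw]
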